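-- pv_equiv track=rewrite | github.com/justarter/GMOCAT | envs/GCATEnv.py | compute_div_reward
-- ===== SOURCE A (Python) =====
-- def compute_div_reward(all_questions, concept_map, tested_questions, qid):
--     concept_cnt = set()
--     reward = 0
--     for q in list(tested_questions):
--         for c in concept_map[q]:
--             concept_cnt.add(c)
--
--     for c in concept_map[qid]:
--         if c not in concept_cnt:
--             reward = 1
--
--     return reward
-- ===== SOURCE B (Python) =====
-- def compute_div_reward(all_questions, concept_map, tested_questions, qid):
--     # qid adds a new concept iff some concept of qid appears in no tested question
--     return int(any(all(c not in concept_map[q] for q in tested_questions)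
--                    for c in concept_map[qid]))
-- ===== Notes on version B (the rewrite author's own statement) =====
-- stated objective: simpler
-- what changed: B never builds the covered-concept set: it scans tested_questions directly per concept of qid with a short-circuiting any/all one-liner, instead of A's two-phase set construction then membership loop.
import Mathlib
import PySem

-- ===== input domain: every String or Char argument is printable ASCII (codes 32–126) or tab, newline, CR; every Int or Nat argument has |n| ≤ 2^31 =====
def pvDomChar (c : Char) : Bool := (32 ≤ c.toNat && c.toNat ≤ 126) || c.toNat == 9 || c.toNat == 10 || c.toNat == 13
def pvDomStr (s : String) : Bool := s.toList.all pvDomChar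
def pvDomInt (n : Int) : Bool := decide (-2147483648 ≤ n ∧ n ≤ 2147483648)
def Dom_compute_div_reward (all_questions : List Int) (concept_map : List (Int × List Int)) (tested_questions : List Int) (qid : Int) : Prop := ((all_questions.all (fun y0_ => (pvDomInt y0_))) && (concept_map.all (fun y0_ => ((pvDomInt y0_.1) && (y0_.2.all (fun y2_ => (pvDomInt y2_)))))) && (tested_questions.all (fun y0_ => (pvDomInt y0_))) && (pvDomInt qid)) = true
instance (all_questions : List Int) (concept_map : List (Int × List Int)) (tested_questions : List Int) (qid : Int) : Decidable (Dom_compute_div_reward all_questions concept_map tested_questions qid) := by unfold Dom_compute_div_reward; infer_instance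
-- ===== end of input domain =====

-- B replaces A's "build the set of already-covered concepts, then test membership" with a direct
-- any/all scan of tested_questions per concept of qid (simpler, no intermediate set).

-- dict lookup (first match = Python dict semantics on the assoc-list representation); used by both ports
def pvLookup (concept_map : List (Int × List Int)) (q : Int) : List Int :=
  (((concept_map.find? (fun p => p.1 == q)).map Prod.snd)).getD []

-- ===== PORT A =====
def compute_div_reward (all_questions : List Int) (concept_map : List (Int × List Int)) (tested_questions : List Int) (qid : Int) : Int :=
  let concept_cnt : PySem.Set Int :=
    tested_questions.foldl (fun s q => (pvLookup concept_map q).foldl PySem.Set.add s) PySem.Set.empty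
  (pvLookup concept_map qid).foldl (fun r c => if PySem.Set.contains concept_cnt c then r else 1) 0

-- ===== PORT B =====
def compute_div_reward_alt (all_questions : List Int) (concept_map : List (Int × List Int)) (tested_questions : List Int) (qid : Int) : Int :=
  if (pvLookup concept_map qid).any
       (fun c => tested_questions.all (fun q => !((pvLookup concept_map q).contains c)))
  then 1 else 0

-- ===== PRECONDITION & SPEC =====
-- Pre_ excludes exactly the inputs on which A raises KeyError: some tested question, or qid,
-- is not a key of concept_map.
def Pre_compute_div_reward (all_questions : List Int) (concept_map : List (Int × List Int)) (tested_questions : List Int) (qid : Int) : Prop :=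
  (tested_questions.all (fun q => concept_map.any (fun p => p.1 == q))
    && concept_map.any (fun p => p.1 == qid)) = true
instance (all_questions : List Int) (concept_map : List (Int × List Int)) (tested_questions : List Int) (qid : Int) : Decidable (Pre_compute_div_reward all_questions concept_map tested_questions qid) := by unfold Pre_compute_div_reward; infer_instance

def pvWitness_compute_div_reward : List Int × (List (Int × List Int)) × List Int × Int :=
  ([1, 2], [(1, [3, 4]), (2, [4])], [1], 2)

def Spec_compute_div_reward (all_questions : List Int) (concept_map : List (Int × List Int)) (tested_questions : List Int) (qid : Int) (out : Int) : Prop := out = compute_div_reward_alt all_questions concept_map tested_questions qid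
instance (all_questions : List Int) (concept_map : List (Int × List Int)) (tested_questions : List Int) (qid : Int) (out : Int) : Decidable (Spec_compute_div_reward all_questions concept_map tested_questions qid out) := by unfold Spec_compute_div_reward; infer_instance

-- ===== CLAIM (what is proved, stated in full; the proofs are below) =====
def Claim_equal_compute_div_reward : Prop := ∀ (all_questions : List Int) (concept_map : List (Int × List Int)) (tested_questions : List Int) (qid : Int), Dom_compute_div_reward all_questions concept_map tested_questions qid → Pre_compute_div_reward all_questions concept_map tested_questions qid → Spec_compute_div_reward all_questions concept_map tested_questions qid (compute_div_reward all_questions concept_map tested_questions qid)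

-- ===== LEMMAS AND PROOFS =====

-- membership in a set built by folding Set.add over a list
theorem mem_foldl_add (l : List Int) (s : PySem.Set Int) (c : Int) :
    c ∈ l.foldl PySem.Set.add s ↔ c ∈ s ∨ c ∈ l := by
  induction l generalizing s with
  | nil => simp
  | cons x xs ih =>
      simp [List.foldl_cons, ih, PySem.Set.mem_add]
      tauto

-- membership in A's covered-concept set = some tested question carries the concept
theorem mem_concept_cnt (cm : List (Int × List Int)) (tq : List Int) (s : PySem.Set Int) (c : Int) :
    c ∈ tq.foldl (fun s q => (pvLookup cm q).foldl PySem.Set.add s) s ↔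
      c ∈ s ∨ ∃ q ∈ tq, c ∈ pvLookup cm q := by
  induction tq generalizing s with
  | nil => simp
  | cons x xs ih =>
      simp [List.foldl_cons, ih, mem_foldl_add]
      tauto

-- A's reward loop is an existence test
theorem foldl_reward (l : List Int) (P : Int → Bool) (r : Int) :
    l.foldl (fun r c => if P c then r else 1) r =
      if l.any (fun c => !P c) then 1 else r := by
  induction l generalizing r with
  | nil => simp
  | cons x xs ih =>
      by_cases h : P x = true <;> simp [List.foldl_cons, h, ih]

-- ===== VERDICT (by name: the statement is the Claim_ definition above) =====
theorem compute_div_reward_spec : Claim_equal_compute_div_reward := by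
  intro aq cm tq qid _ _
  unfold Spec_compute_div_reward compute_div_reward compute_div_reward_alt
  rw [foldl_reward]
  congr 1
  simp only [List.any_eq_true, List.all_eq_true, Bool.not_eq_true',
    eq_iff_iff]
  constructor
  · rintro ⟨c, hc, hnc⟩
    refine ⟨c, hc, fun q hq => ?_⟩
    rw [PySem.Set.contains, List.contains_eq_mem, decide_eq_false_iff_not] at hnc
    by_contra hmem
    simp only [Bool.not_eq_false, List.contains_eq_mem, decide_eq_true_eq] at hmem
    have hm := (mem_concept_cnt cm tq PySem.Set.empty c).2 (Or.inr ⟨q, hq, hmem⟩)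
    exact hnc hm
  · rintro ⟨c, hc, hall⟩
    refine ⟨c, hc, ?_⟩
    simp only [PySem.Set.contains, List.contains_eq_mem, decide_eq_false_iff_not]
    rw [mem_concept_cnt]
    rintro (h | ⟨q, hq, hmem⟩)
    · simp [PySem.Set.empty] at h
    · have := hall q hq
      simp [List.contains_eq_mem, hmem] at this
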